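-- pv_equiv track=rewrite | github.com/kimigoe220/fashion-style | Uniqlo/size/size_top.py | _nearest_in_stock
-- ===== SOURCE A (Python) =====
-- from typing import Dict, List, Optional, Tuple, Any
--
-- def _nearest_in_stock(target_idx: int, in_stock_indices: List[int]) -> Optional[int]:
--     """
--     Pick closest index in stock. If tie, prefer the larger size (safer fit).
--     """
--     if not in_stock_indices:
--         return None
--     best = None
--     best_dist = 10**9
--     for idx in in_stock_indices:
--         dist = abs(idx - target_idx)
--         if dist < best_dist:
--             best_dist = dist
--             best = idx
--         elif dist == best_dist:
--             # tie-break: prefer bigger size (higher idx)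
--             if idx > (best if best is not None else -1):
--                 best = idx
--     return best
-- ===== SOURCE B (Python) =====
-- from typing import List, Optional
--
--
-- def _nearest_in_stock(target_idx: int, in_stock_indices: List[int]) -> Optional[int]:
--     """
--     Pick closest index in stock. If tie, prefer the larger size (safer fit).
--     Two passes: first the minimal distance, then the largest index achieving it.
--     """
--     if not in_stock_indices:
--         return None
--     min_dist = min(abs(idx - target_idx) for idx in in_stock_indices)
--     return max(idx for idx in in_stock_indices if abs(idx - target_idx) == min_dist)
-- ===== Notes on version B (the rewrite author's own statement) =====
-- stated objective: simpler
-- what changed: Replaces the fused loop carrying (best, best_dist) state with inline tie-breaking and a sentinel distance of 10**9 by two stateless passes: min of the distances, then max over the indices achieving it.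
-- intended difference: On nonempty lists where every index is at distance >= 10**9 from target_idx (and any index at exactly 10**9 is negative), A's sentinel best_dist = 10**9 and best-initialised-to-None/-1 logic make it return None although stock exists; B returns the largest closest in-stock index, which is the intended value. — e.g. on _nearest_in_stock(0, [-1000000000]): A returns none, B returns some (-1000000000)
import Mathlib
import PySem

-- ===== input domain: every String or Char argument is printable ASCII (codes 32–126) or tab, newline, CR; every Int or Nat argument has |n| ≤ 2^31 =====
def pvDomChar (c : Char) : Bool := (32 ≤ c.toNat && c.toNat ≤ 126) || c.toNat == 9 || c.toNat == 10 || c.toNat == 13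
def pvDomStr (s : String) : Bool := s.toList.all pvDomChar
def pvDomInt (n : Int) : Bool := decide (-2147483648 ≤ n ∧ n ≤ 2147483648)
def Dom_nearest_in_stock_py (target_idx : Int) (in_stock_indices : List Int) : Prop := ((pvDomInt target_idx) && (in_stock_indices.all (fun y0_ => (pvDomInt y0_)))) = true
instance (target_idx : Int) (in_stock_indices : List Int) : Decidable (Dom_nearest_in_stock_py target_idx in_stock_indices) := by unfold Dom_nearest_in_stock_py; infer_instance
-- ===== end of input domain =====

-- B replaces A's fused loop (state (best, best_dist), sentinel distance 10^9, inline tie-break)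
-- by two stateless passes: min of the distances, then max of the indices achieving it ('simpler').

-- ===== PORT A =====
-- one iteration of A's for-loop; the state is (best : Option Int, best_dist : Int)
def pvStepA (target_idx : Int) (s : Option Int × Int) (idx : Int) : Option Int × Int :=
  let dist := |idx - target_idx|
  if dist < s.2 then (some idx, dist)
  else if dist = s.2 then
    (if idx > (s.1.getD (-1)) then (some idx, s.2) else s)
  else s

def nearest_in_stock_py (target_idx : Int) (in_stock_indices : List Int) : Option Int :=
  if in_stock_indices = [] then none
  else (in_stock_indices.foldl (pvStepA target_idx) (none, 10 ^ 9)).1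

-- ===== PORT B =====
def nearest_in_stock_py_alt (target_idx : Int) (in_stock_indices : List Int) : Option Int :=
  if in_stock_indices = [] then none
  else
    match (in_stock_indices.map (fun idx => |idx - target_idx|)).min? with
    | none => none  -- unreachable: the list is nonempty
    | some min_dist =>
        (in_stock_indices.filter (fun idx => |idx - target_idx| = min_dist)).max?

-- ===== PRECONDITION & SPEC =====
-- On nonempty lists where every index is at distance ≥ 10^9 from target_idx (and any index at
-- distance exactly 10^9 is negative), A's sentinel best_dist = 10^9 and its None/-1 initial best
-- make it return None although stock exists; B returns the largest closest index, the intended value.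
def D_nearest_in_stock_py (target_idx : Int) (in_stock_indices : List Int) : Prop :=
  in_stock_indices ≠ [] ∧
    ∀ i ∈ in_stock_indices, 10 ^ 9 ≤ |i - target_idx| ∧ (|i - target_idx| = 10 ^ 9 → i < 0)
instance (target_idx : Int) (in_stock_indices : List Int) : Decidable (D_nearest_in_stock_py target_idx in_stock_indices) := by unfold D_nearest_in_stock_py; infer_instance

def Spec_nearest_in_stock_py (target_idx : Int) (in_stock_indices : List Int) (out : Option Int) : Prop := ¬ D_nearest_in_stock_py target_idx in_stock_indices → out = nearest_in_stock_py_alt target_idx in_stock_indices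
instance (target_idx : Int) (in_stock_indices : List Int) (out : Option Int) : Decidable (Spec_nearest_in_stock_py target_idx in_stock_indices out) := by unfold Spec_nearest_in_stock_py; infer_instance

def pvDiffWitness_nearest_in_stock_py : Int × List Int := (0, [-1000000000])
def pvDiffWitnessOut_nearest_in_stock_py : (Option Int) × (Option Int) := (none, some (-1000000000))

-- ===== CLAIM (what is proved, stated in full; the proofs are below) =====
def Claim_unchanged_nearest_in_stock_py : Prop := ∀ (target_idx : Int) (in_stock_indices : List Int), Dom_nearest_in_stock_py target_idx in_stock_indices → Spec_nearest_in_stock_py target_idx in_stock_indices (nearest_in_stock_py target_idx in_stock_indices)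
def Claim_changed_nearest_in_stock_py : Prop := Dom_nearest_in_stock_py (pvDiffWitness_nearest_in_stock_py.1) (pvDiffWitness_nearest_in_stock_py.2) ∧ D_nearest_in_stock_py (pvDiffWitness_nearest_in_stock_py.1) (pvDiffWitness_nearest_in_stock_py.2) ∧ nearest_in_stock_py (pvDiffWitness_nearest_in_stock_py.1) (pvDiffWitness_nearest_in_stock_py.2) = pvDiffWitnessOut_nearest_in_stock_py.1 ∧ nearest_in_stock_py_alt (pvDiffWitness_nearest_in_stock_py.1) (pvDiffWitness_nearest_in_stock_py.2) = pvDiffWitnessOut_nearest_in_stock_py.2 ∧ pvDiffWitnessOut_nearest_in_stock_py.1 ≠ pvDiffWitnessOut_nearest_in_stock_py.2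
def Claim_exact_nearest_in_stock_py : Prop := ∀ (target_idx : Int) (in_stock_indices : List Int), Dom_nearest_in_stock_py target_idx in_stock_indices → D_nearest_in_stock_py target_idx in_stock_indices → nearest_in_stock_py target_idx in_stock_indices ≠ nearest_in_stock_py_alt target_idx in_stock_indices

-- ===== LEMMAS AND PROOFS =====

-- a running min never exceeds its start
theorem pv_foldl_min_le (F : List Int) (a : Int) : F.foldl min a ≤ a := by
  induction F generalizing a with
  | nil => simp
  | cons x F' ih => exact le_trans (ih (min a x)) (by omega)

-- pull a min out of the start of a running min
theorem pv_foldl_min_min (F : List Int) (a b : Int) :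
    F.foldl min (min a b) = min a (F.foldl min b) := by
  induction F generalizing b with
  | nil => rfl
  | cons x F' ih =>
      simp only [List.foldl_cons]
      rw [show min (min a b) x = min a (min b x) from by omega, ih]

-- dropping elements ≤ x does not change a running max that starts at a ≥ x
theorem pv_foldl_max_filter (F : List Int) (x a : Int) (h : x ≤ a) :
    (F.filter (fun y => x < y)).foldl max a = F.foldl max a := by
  induction F generalizing a with
  | nil => rfl
  | cons z F' ih =>
      by_cases hz : x < z
      · have hfc : (z :: F').filter (fun y => x < y) = z :: F'.filter (fun y => x < y) := by
          simp [hz]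
        rw [hfc, List.foldl_cons, List.foldl_cons]
        exact ih (max a z) (by omega)
      · have hfc : (z :: F').filter (fun y => x < y) = F'.filter (fun y => x < y) := by
          simp [hz]
        rw [hfc, List.foldl_cons, show max a z = a from by omega]
        exact ih a h

-- the "if no strictly larger tie then current else max of larger ties" pattern is a running max
theorem pv_ifmax (F : List Int) (x : Int) :
    (if F.filter (fun y => x < y) = [] then some x
     else (F.filter (fun y => x < y)).max?) = some (F.foldl max x) := by
  induction F generalizing x with
  | nil => simp
  | cons y F' ih =>
      by_cases hy : x < y
      · have hfc : (y :: F').filter (fun y' => x < y') = y :: F'.filter (fun y' => x < y') := by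
          simp [hy]
        rw [hfc, if_neg (by simp), List.max?_cons', List.foldl_cons,
          show max x y = y from by omega,
          pv_foldl_max_filter F' x y (le_of_lt hy)]
      · have hfc : (y :: F').filter (fun y' => x < y') = F'.filter (fun y' => x < y') := by
          simp [hy]
        rw [hfc, List.foldl_cons, show max x y = x from by omega]
        exact ih x

-- closed form of A's loop, for an arbitrary start state
theorem pv_foldA_char (t : Int) (l : List Int) : ∀ (b : Option Int) (d : Int),
    l.foldl (pvStepA t) (b, d) =
      (if (l.map (fun i => |i - t|)).foldl min d < d then
        ((l.filter (fun i => |i - t| = (l.map (fun i => |i - t|)).foldl min d)).max?,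
         (l.map (fun i => |i - t|)).foldl min d)
      else
        ((if l.filter (fun i => |i - t| = d ∧ b.getD (-1) < i) = [] then b
          else (l.filter (fun i => |i - t| = d ∧ b.getD (-1) < i)).max?), d)) := by
  induction l with
  | nil => intro b d; simp
  | cons x xs ih =>
    intro b d
    have hmin_le : (xs.map (fun i => |i - t|)).foldl min (|x - t|) ≤ |x - t| :=
      pv_foldl_min_le _ _
    by_cases h1 : |x - t| < d
    · -- strict improvement at the head
      have hstep : pvStepA t (b, d) x = (some x, |x - t|) := by
        simp [pvStepA, h1]
      rw [List.foldl_cons, hstep, ih (some x) (|x - t|)]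
      have hmind : min d (|x - t|) = |x - t| := by omega
      simp only [List.map_cons, List.foldl_cons, hmind]
      by_cases h2 : (xs.map (fun i => |i - t|)).foldl min (|x - t|) < |x - t|
      · -- the final min beats the head distance too
        rw [if_pos h2, if_pos (by omega)]
        have hfc : (x :: xs).filter
              (fun i => |i - t| = (xs.map (fun i => |i - t|)).foldl min (|x - t|))
            = xs.filter (fun i => |i - t| = (xs.map (fun i => |i - t|)).foldl min (|x - t|)) := by
          have hx : ¬ (|x - t| = (xs.map (fun i => |i - t|)).foldl min (|x - t|)) := by omega
          simp [hx]
        rw [hfc]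
      · -- the head distance is the final min
        have hm : (xs.map (fun i => |i - t|)).foldl min (|x - t|) = |x - t| := by omega
        rw [if_neg h2]
        simp only [hm]
        rw [if_pos h1]
        have hT : xs.filter (fun i => |i - t| = |x - t| ∧ (some x).getD (-1) < i)
            = (xs.filter (fun i => |i - t| = |x - t|)).filter (fun i => x < i) := by
          rw [List.filter_filter]
          refine List.filter_congr ?_
          intro i _
          simp only [Option.getD_some]
          by_cases hA : |i - t| = |x - t| <;> by_cases hxi : x < i <;> simp [hA, hxi]
        have hmx := pv_ifmax (xs.filter (fun i => |i - t| = |x - t|)) x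
        have hfc : (x :: xs).filter (fun i => |i - t| = |x - t|)
            = x :: xs.filter (fun i => |i - t| = |x - t|) := by simp
        rw [hT, hfc, List.max?_cons', ← hmx]
    · by_cases h2 : |x - t| = d
      · -- tie at the head
        by_cases h3 : b.getD (-1) < x
        · -- the head beats the current best (or the -1 sentinel)
          have hstep : pvStepA t (b, d) x = (some x, d) := by
            simp [pvStepA, h2, h3]
          rw [List.foldl_cons, hstep, ih (some x) d]
          have hmind : min d (|x - t|) = d := by omega
          simp only [List.map_cons, List.foldl_cons, hmind]
          by_cases h4 : (xs.map (fun i => |i - t|)).foldl min d < d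
          · rw [if_pos h4, if_pos h4]
            have hfc : (x :: xs).filter
                  (fun i => |i - t| = (xs.map (fun i => |i - t|)).foldl min d)
                = xs.filter (fun i => |i - t| = (xs.map (fun i => |i - t|)).foldl min d) := by
              have hx : ¬ (|x - t| = (xs.map (fun i => |i - t|)).foldl min d) := by omega
              simp [hx]
            rw [hfc]
          · rw [if_neg h4, if_neg h4]
            have hT : xs.filter (fun i => |i - t| = d ∧ (some x).getD (-1) < i)
                = (xs.filter (fun i => |i - t| = d ∧ b.getD (-1) < i)).filter (fun i => x < i) := by
              rw [List.filter_filter]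
              refine List.filter_congr ?_
              intro i _
              simp only [Option.getD_some]
              by_cases hA : |i - t| = d <;> by_cases hxi : x < i <;>
                simp [hA, hxi] <;> omega
            have hmx := pv_ifmax (xs.filter (fun i => |i - t| = d ∧ b.getD (-1) < i)) x
            have hfc : (x :: xs).filter (fun i => |i - t| = d ∧ b.getD (-1) < i)
                = x :: xs.filter (fun i => |i - t| = d ∧ b.getD (-1) < i) := by
              simp [h2, h3]
            rw [hT, hfc, if_neg (List.cons_ne_nil x _), List.max?_cons', ← hmx]
        · -- the head loses the tie: state unchanged, head in no filter
          have hstep : pvStepA t (b, d) x = (b, d) := by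
            simp [pvStepA, h2, h3]
          rw [List.foldl_cons, hstep, ih b d]
          have hmind : min d (|x - t|) = d := by omega
          simp only [List.map_cons, List.foldl_cons, hmind]
          by_cases h4 : (xs.map (fun i => |i - t|)).foldl min d < d
          · rw [if_pos h4, if_pos h4]
            have hfc : (x :: xs).filter
                  (fun i => |i - t| = (xs.map (fun i => |i - t|)).foldl min d)
                = xs.filter (fun i => |i - t| = (xs.map (fun i => |i - t|)).foldl min d) := by
              have hx : ¬ (|x - t| = (xs.map (fun i => |i - t|)).foldl min d) := by omega
              simp [hx]
            rw [hfc]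
          · rw [if_neg h4, if_neg h4]
            have hfc : (x :: xs).filter (fun i => |i - t| = d ∧ b.getD (-1) < i)
                = xs.filter (fun i => |i - t| = d ∧ b.getD (-1) < i) := by
              have hx : ¬ (|x - t| = d ∧ b.getD (-1) < x) := by tauto
              simp [hx]
            rw [hfc]
      · -- the head is strictly farther: state unchanged, head in no filter
        have hstep : pvStepA t (b, d) x = (b, d) := by
          simp [pvStepA, h1, h2]
        rw [List.foldl_cons, hstep, ih b d]
        have hmind : min d (|x - t|) = d := by omega
        simp only [List.map_cons, List.foldl_cons, hmind]
        by_cases h4 : (xs.map (fun i => |i - t|)).foldl min d < d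
        · rw [if_pos h4, if_pos h4]
          have hfc : (x :: xs).filter
                (fun i => |i - t| = (xs.map (fun i => |i - t|)).foldl min d)
              = xs.filter (fun i => |i - t| = (xs.map (fun i => |i - t|)).foldl min d) := by
            have hx : ¬ (|x - t| = (xs.map (fun i => |i - t|)).foldl min d) := by omega
            simp [hx]
          rw [hfc]
        · rw [if_neg h4, if_neg h4]
          have hfc : (x :: xs).filter (fun i => |i - t| = d ∧ b.getD (-1) < i)
              = xs.filter (fun i => |i - t| = d ∧ b.getD (-1) < i) := by
            have hx : ¬ (|x - t| = d ∧ b.getD (-1) < x) := by tauto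
            simp [hx]
          rw [hfc]

theorem nearest_in_stock_py_spec : Claim_unchanged_nearest_in_stock_py := by
  intro t l _ hnd
  match l with
  | [] => rfl
  | x :: xs =>
    have hne : (x :: xs : List Int) ≠ [] := by simp
    have hmin : ((x :: xs).map (fun i => |i - t|)).min?
        = some ((xs.map (fun i => |i - t|)).foldl min (|x - t|)) := by
      rw [List.map_cons, List.min?_cons']
    set md := (xs.map (fun i => |i - t|)).foldl min (|x - t|) with hmd
    have hmd_le : ∀ i ∈ (x :: xs : List Int), md ≤ |i - t| := by
      intro i hi
      have h := (List.min?_eq_some_iff.mp hmin).2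
      exact h _ (List.mem_map_of_mem hi)
    have hfold : ((x :: xs).map (fun i => |i - t|)).foldl min (10 ^ 9)
        = min (10 ^ 9) md := by
      have hle := pv_foldl_min_le (xs.map (fun i => |i - t|)) (|x - t|)
      simp only [List.map_cons, List.foldl_cons]
      rw [show min (10 ^ 9 : Int) (|x - t|) = min (10 ^ 9) (min (|x - t|) (|x - t|)) from by omega,
        pv_foldl_min_min, pv_foldl_min_min]
      omega
    have hBdef : nearest_in_stock_py_alt t (x :: xs)
        = ((x :: xs).filter (fun idx => |idx - t| = md)).max? := by
      unfold nearest_in_stock_py_alt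
      rw [if_neg hne, hmin]
    show nearest_in_stock_py t (x :: xs) = nearest_in_stock_py_alt t (x :: xs)
    unfold nearest_in_stock_py
    rw [if_neg hne, pv_foldA_char, hfold, hBdef]
    by_cases hlt : md < 10 ^ 9
    · rw [if_pos (by omega)]
      have hmm : min ((10 : Int) ^ 9) md = md := by omega
      simp only [hmm]
    · -- md = 10^9 and, since ¬D_, some closest index is ≥ 0
      unfold D_nearest_in_stock_py at hnd
      push Not at hnd
      obtain ⟨i0, hi0mem, hi0⟩ := hnd hne
      have hge : 10 ^ 9 ≤ |i0 - t| := le_trans (by omega) (hmd_le i0 hi0mem)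
      have hi0d : |i0 - t| = 10 ^ 9 ∧ 0 ≤ i0 := by
        rcases hi0 hge with ⟨h9, hnn⟩
        exact ⟨h9, hnn⟩
      have hmd9 : md = 10 ^ 9 := by
        have := hmd_le i0 hi0mem
        omega
      rw [if_neg (by omega)]
      simp only [hmd9]
      -- B's filter F and A's tie filter T = F.filter (> -1) have the same max
      have hF : ((x :: xs).filter (fun i => |i - t| = 10 ^ 9)).max? ≠ none := by
        intro hc
        rw [List.max?_eq_none_iff, List.filter_eq_nil_iff] at hc
        exact hc i0 hi0mem (by simpa using hi0d.1)
      obtain ⟨M, hM⟩ := Option.ne_none_iff_exists'.mp hF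
      obtain ⟨hMmem, hMle⟩ := List.max?_eq_some_iff.mp hM
      have hMge : i0 ≤ M := hMle i0 (List.mem_filter_of_mem hi0mem (by simpa using hi0d.1))
      have hT : (x :: xs).filter (fun i => |i - t| = 10 ^ 9 ∧ (none : Option Int).getD (-1) < i)
          = ((x :: xs).filter (fun i => |i - t| = 10 ^ 9)).filter (fun i => (-1 : Int) < i) := by
        rw [List.filter_filter]
        refine List.filter_congr ?_
        intro i _
        simp only [Option.getD_none]
        by_cases hA : |i - t| = 10 ^ 9 <;> by_cases hxi : (-1 : Int) < i <;> simp [hA, hxi]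
      have hTmax : (((x :: xs).filter (fun i => |i - t| = 10 ^ 9)).filter
          (fun i => (-1 : Int) < i)).max? = some M := by
        apply List.max?_eq_some_iff.mpr
        refine ⟨List.mem_filter_of_mem hMmem (by simp; omega), ?_⟩
        intro b hb
        exact hMle b (List.mem_of_mem_filter hb)
      have hTne : (x :: xs).filter (fun i => |i - t| = 10 ^ 9 ∧ (none : Option Int).getD (-1) < i) ≠ [] := by
        rw [hT]; intro hc; rw [hc] at hTmax; simp at hTmax
      show (if _ = ([] : List Int) then (none : Option Int) else _) = _
      rw [if_neg hTne, hT, hTmax, hM]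

theorem nearest_in_stock_py_changed : Claim_changed_nearest_in_stock_py := by
  unfold Claim_changed_nearest_in_stock_py; decide

theorem nearest_in_stock_py_tight : Claim_exact_nearest_in_stock_py := by
  intro t l _ hd
  obtain ⟨hne, hall⟩ := hd
  match l with
  | x :: xs =>
    have hmd_le : ∀ i ∈ (x :: xs : List Int), 10 ^ 9 ≤ |i - t| := fun i hi => (hall i hi).1
    have hfold : ((x :: xs).map (fun i => |i - t|)).foldl min (10 ^ 9) = 10 ^ 9 := by
      have hstep : ∀ (F : List Int) (a : Int), (10 : Int) ^ 9 ≤ a →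
          (∀ y ∈ F, (10 : Int) ^ 9 ≤ y) → (10 : Int) ^ 9 ≤ F.foldl min a := by
        intro F
        induction F with
        | nil => intro a ha _; simpa using ha
        | cons y F' ih =>
            intro a ha hy
            simp only [List.foldl_cons]
            exact ih (min a y) (by have := hy y (by simp); omega)
              (fun z hz => hy z (by simp [hz]))
      have hle : (10 : Int) ^ 9 ≤ (xs.map (fun i => |i - t|)).foldl min (|x - t|) :=
        hstep _ _ (hmd_le x (by simp))
          (fun z hz => by obtain ⟨i, hi, rfl⟩ := List.mem_map.mp hz
                          exact hmd_le i (by simp [hi]))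
      have hle' := pv_foldl_min_le (xs.map (fun i => |i - t|)) (|x - t|)
      simp only [List.map_cons, List.foldl_cons]
      rw [show min (10 ^ 9 : Int) (|x - t|) = min (10 ^ 9) (min (|x - t|) (|x - t|)) from by omega,
        pv_foldl_min_min, pv_foldl_min_min]
      omega
    have hT : (x :: xs).filter (fun i => |i - t| = 10 ^ 9 ∧ (none : Option Int).getD (-1) < i) = [] := by
      rw [List.filter_eq_nil_iff]
      intro i hi
      simp only [Option.getD_none, decide_eq_true_eq, not_and]
      intro h9
      have := (hall i hi).2 h9
      omega
    have hA : nearest_in_stock_py t (x :: xs) = none := by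
      unfold nearest_in_stock_py
      rw [if_neg (by simp), pv_foldA_char, hfold, if_neg (by omega), hT]
      simp
    have hmin : ((x :: xs).map (fun i => |i - t|)).min?
        = some ((xs.map (fun i => |i - t|)).foldl min (|x - t|)) := by
      rw [List.map_cons, List.min?_cons']
    have hBdef : nearest_in_stock_py_alt t (x :: xs)
        = ((x :: xs).filter (fun idx =>
            |idx - t| = (xs.map (fun i => |i - t|)).foldl min (|x - t|))).max? := by
      unfold nearest_in_stock_py_alt
      rw [if_neg (by simp), hmin]
    have hB : nearest_in_stock_py_alt t (x :: xs) ≠ none := by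
      rw [hBdef]
      obtain ⟨hmem, -⟩ := List.min?_eq_some_iff.mp hmin
      obtain ⟨i0, hi0, hdist⟩ := List.mem_map.mp hmem
      intro hc
      rw [List.max?_eq_none_iff, List.filter_eq_nil_iff] at hc
      exact hc i0 hi0 (by simpa using hdist)
    rw [hA]
    exact fun hc => hB hc.symm
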